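-- pv_equiv track=rewrite | github.com/deregulcicek/streamlit | lib/streamlit/codemod/scripts/add_flex_param.py | find_helper_functions
-- ===== SOURCE A (Python) =====
-- def find_helper_functions(
--     proto_vars: dict[str, list[str]],
--     function_calls: dict[str, set[str]],
--     called_by: dict[str, set[str]],
-- ) -> set[str]:
--     """Find all helper functions that create protos."""
--     helper_functions = set()
--     decorated_functions = {
--         name
--         for name, dec in proto_vars.items()
--         if any(name.startswith("_") for name in called_by.get(name, set()))
--     }
--
--     def traverse_calls(func_name: str, visited: set[str]) -> None:
--         if func_name in visited:
--             return
--         visited.add(func_name)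
--
--         # Add any function that creates protos and is called by a decorated function
--         if func_name in proto_vars:
--             helper_functions.add(func_name)
--
--         # Follow both outgoing and incoming calls
--         for called_func in function_calls.get(func_name, set()):
--             traverse_calls(called_func, visited)
--         for calling_func in called_by.get(func_name, set()):
--             traverse_calls(calling_func, visited)
--
--     # Start from both decorated functions and known proto-creating functions
--     for func_name in set(decorated_functions) | set(proto_vars.keys()):
--         traverse_calls(func_name, set())
--
--     return helper_functions
-- ===== SOURCE B (Python) =====
-- def find_helper_functions(
--     proto_vars: dict[str, list[str]],
--     function_calls: dict[str, set[str]],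
--     called_by: dict[str, set[str]],
-- ) -> set[str]:
--     """Find all helper functions that create protos.
--
--     Staged re-implementation: for each start node an iterative explicit-stack
--     DFS first computes the ordered visit list of its (undirected) reachable
--     component; a separate pass then filters that list for proto-creating
--     functions and adds them to the result set.
--     """
--     decorated_functions = {
--         name
--         for name in proto_vars
--         if any(caller.startswith("_") for caller in called_by.get(name, set()))
--     }
--
--     helper_functions = set()
--     for start in set(decorated_functions) | set(proto_vars.keys()):
--         # phase 1: visit order of everything reachable from `start`
--         order: list[str] = []
--         stack = [start]
--         while stack:
--             node = stack.pop()
--             if node in order: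
--                 continue
--             order.append(node)
--             neighbors = list(function_calls.get(node, set())) + list(called_by.get(node, set()))
--             # reversed keeps the classic left-to-right DFS visiting order
--             stack.extend(reversed(neighbors))
--         # phase 2: collect the proto-creating functions among them
--         for node in order:
--             if node in proto_vars:
--                 helper_functions.add(node)
--
--     return helper_functions
-- ===== Notes on version B (the rewrite author's own statement) =====
-- stated objective: alternative
-- what changed: A's recursive traverse_calls, which mutates a shared helper set and a visited set through a closure, is replaced by a staged per-start computation: an explicit-stack loop first builds the DFS visit-order list alone, then a separate pass filters that list for proto-creating functions.
import Mathlib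
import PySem

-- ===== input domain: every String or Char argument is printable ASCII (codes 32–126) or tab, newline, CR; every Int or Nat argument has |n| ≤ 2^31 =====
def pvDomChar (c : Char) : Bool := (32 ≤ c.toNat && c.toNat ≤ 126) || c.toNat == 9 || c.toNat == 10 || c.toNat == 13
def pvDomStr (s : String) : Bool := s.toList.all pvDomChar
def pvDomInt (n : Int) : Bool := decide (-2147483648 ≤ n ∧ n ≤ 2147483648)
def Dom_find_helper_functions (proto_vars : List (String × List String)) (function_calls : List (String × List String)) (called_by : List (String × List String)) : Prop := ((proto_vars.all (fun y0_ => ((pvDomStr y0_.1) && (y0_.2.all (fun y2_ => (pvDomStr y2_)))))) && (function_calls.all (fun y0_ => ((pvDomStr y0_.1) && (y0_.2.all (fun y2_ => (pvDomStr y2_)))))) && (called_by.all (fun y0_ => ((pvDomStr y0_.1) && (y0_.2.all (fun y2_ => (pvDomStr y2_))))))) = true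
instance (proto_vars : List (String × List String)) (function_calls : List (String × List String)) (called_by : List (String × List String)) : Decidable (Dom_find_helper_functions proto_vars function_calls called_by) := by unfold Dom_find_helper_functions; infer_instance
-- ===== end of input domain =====

-- B replaces A's recursive traverse_calls (which mutates a shared helper set and a visited set
-- through a closure) by a staged per-start computation: an explicit-stack loop first produces the
-- DFS visit-order list alone, then a separate pass filters it for proto-creating functions.
-- Alternative decomposition, same cost; equivalence is about the return value (no argument mutation).

-- ===== PORT A =====
-- fuel bookkeeping: every node the traversal can ever visit occurs in this list (keys and values
-- of both graphs), so its length bounds the recursion depth; the fuel chosen at the call sites is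
-- proved sufficient below (it never runs out there) — Python's recursion needs none
def pvPool (function_calls : List (String × List String)) (called_by : List (String × List String)) : List String :=
  function_calls.flatMap (fun p => p.1 :: p.2) ++ called_by.flatMap (fun p => p.1 :: p.2)

-- literal port of A's recursive traverse_calls, threading (visited, helper_functions); Nat = fuel
def travA (pv fc cb : PySem.Dict String (List String)) :
    Nat → String → (PySem.Set String × PySem.Set String) → (PySem.Set String × PySem.Set String)
  | 0, _, st => st
  | fuel+1, node, st =>
    if PySem.Set.contains st.1 node then st
    else
      let vis := PySem.Set.add st.1 node
      let hel := if pv.contains node then PySem.Set.add st.2 node else st.2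
      let st1 := (fc.getD node []).foldl (fun s n => travA pv fc cb fuel n s) (vis, hel)
      (cb.getD node []).foldl (fun s n => travA pv fc cb fuel n s) st1

def find_helper_functions (proto_vars : List (String × List String)) (function_calls : List (String × List String)) (called_by : List (String × List String)) : List String :=
  let pvd := PySem.Dict.mk proto_vars
  let fcd := PySem.Dict.mk function_calls
  let cbd := PySem.Dict.mk called_by
  let decorated := proto_vars.foldl
    (fun s p => if (cbd.getD p.1 []).any (fun c => PySem.Str.startswith c "_") then PySem.Set.add s p.1 else s)
    PySem.Set.empty
  let starts := PySem.Set.union decorated pvd.keys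
  let fuel := (pvPool function_calls called_by).length + 1
  starts.foldl (fun hel s => (travA pvd fcd cbd fuel s (PySem.Set.empty, hel)).2) PySem.Set.empty

-- ===== PORT B =====
-- total number of neighbour entries (used only for B's loop fuel)
def pvEdges (function_calls : List (String × List String)) (called_by : List (String × List String)) : Nat :=
  (function_calls.flatMap (fun p => p.2)).length + (called_by.flatMap (fun p => p.2)).length

-- literal port of B's phase-1 while loop: it only builds the ordered visit list; the stack's TOP
-- is the list HEAD (Python pops from the end and extends with reversed(neighbors), i.e. the next
-- node popped is the first neighbour: exactly pushing `neighbors ++ stack`); Nat = fuel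
def dfsOrder (fc cb : PySem.Dict String (List String)) :
    Nat → List String → List String → List String
  | 0, _, order => order
  | _+1, [], order => order
  | fuel+1, node :: stack, order =>
    if PySem.Set.contains order node then dfsOrder fc cb fuel stack order
    else dfsOrder fc cb fuel ((fc.getD node [] ++ cb.getD node []) ++ stack) (order ++ [node])

def find_helper_functions_alt (proto_vars : List (String × List String)) (function_calls : List (String × List String)) (called_by : List (String × List String)) : List String :=
  let pvd := PySem.Dict.mk proto_vars
  let fcd := PySem.Dict.mk function_calls
  let cbd := PySem.Dict.mk called_by
  -- {name for name, _ in items if any(caller.startswith("_") …)} = set of the filtered key list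
  let decorated := PySem.Set.ofList ((proto_vars.map Prod.fst).filter
    (fun name => (cbd.getD name []).any (fun c => PySem.Str.startswith c "_")))
  let fuel := 1 + ((pvPool function_calls called_by).length + 1) * (pvEdges function_calls called_by + 1)
  (PySem.Set.union decorated pvd.keys).foldl
    (fun hel start =>
      (dfsOrder fcd cbd fuel [start] []).foldl
        (fun h node => if pvd.contains node then PySem.Set.add h node else h) hel)
    PySem.Set.empty

-- ===== PRECONDITION & SPEC =====
def Spec_find_helper_functions (proto_vars : List (String × List String)) (function_calls : List (String × List String)) (called_by : List (String × List String)) (out : List String) : Prop := out = find_helper_functions_alt proto_vars function_calls called_by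
instance (proto_vars : List (String × List String)) (function_calls : List (String × List String)) (called_by : List (String × List String)) (out : List String) : Decidable (Spec_find_helper_functions proto_vars function_calls called_by out) := by unfold Spec_find_helper_functions; infer_instance

-- ===== CLAIM (what is proved, stated in full; the proofs are below) =====
def Claim_equal_find_helper_functions : Prop := ∀ (proto_vars : List (String × List String)) (function_calls : List (String × List String)) (called_by : List (String × List String)), Dom_find_helper_functions proto_vars function_calls called_by → Spec_find_helper_functions proto_vars function_calls called_by (find_helper_functions proto_vars function_calls called_by)

-- ===== LEMMAS AND PROOFS =====

-- B's phase-2 filter pass, as a named fold (identical term to the one in find_helper_functions_alt)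
def addIf (pv : PySem.Dict String (List String)) (hel : PySem.Set String) (l : List String) : PySem.Set String :=
  l.foldl (fun h node => if pv.contains node then PySem.Set.add h node else h) hel

theorem addIf_append (pv : PySem.Dict String (List String)) (hel : PySem.Set String) (a b : List String) :
    addIf pv hel (a ++ b) = addIf pv (addIf pv hel a) b := List.foldl_append ..

-- proof-level recursive mirror of the visit-order component alone
def travR (fc cb : PySem.Dict String (List String)) : Nat → String → List String → List String
  | 0, _, vis => vis
  | fuel+1, node, vis =>
    if PySem.Set.contains vis node then vis
    else
      let vis1 := (fc.getD node []).foldl (fun v n => travR fc cb fuel n v) (PySem.Set.add vis node)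
      (cb.getD node []).foldl (fun v n => travR fc cb fuel n v) vis1

-- number of pool nodes not yet visited
def pvMu (pool vis : List String) : Nat :=
  (PySem.Set.ofList pool).countP (fun x => !(PySem.Set.contains vis x))

theorem pvMu_mono (pool vis vis' : List String) (h : vis ⊆ vis') : pvMu pool vis' ≤ pvMu pool vis := by
  unfold pvMu
  apply List.countP_mono_left
  intro a _ ha
  simp_all
  intro hm; exact ha (h hm)

theorem pvMu_le (pool vis : List String) : pvMu pool vis ≤ pool.length := by
  unfold pvMu
  calc (PySem.Set.ofList pool).countP _ ≤ (PySem.Set.ofList pool).length := List.countP_le_length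
    _ ≤ pool.length := PySem.Set.length_ofList_le pool

theorem pvMu_add_lt (pool vis : List String) (n : String) (hp : n ∈ pool) (hv : n ∉ vis) :
    pvMu pool (PySem.Set.add vis n) < pvMu pool vis := by
  rw [PySem.Set.add_of_not_mem hv]
  have hm : n ∈ PySem.Set.ofList pool := (PySem.Set.mem_ofList pool n).mpr hp
  obtain ⟨s, t, hst⟩ := List.append_of_mem hm
  unfold pvMu
  rw [hst]
  simp only [List.countP_append, List.countP_cons]
  have h1 : List.countP (fun x => !(PySem.Set.contains (vis ++ [n]) x)) s ≤ List.countP (fun x => !(PySem.Set.contains vis x)) s := by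
    apply List.countP_mono_left; intro a _ ha; simp_all
  have h2 : List.countP (fun x => !(PySem.Set.contains (vis ++ [n]) x)) t ≤ List.countP (fun x => !(PySem.Set.contains vis x)) t := by
    apply List.countP_mono_left; intro a _ ha; simp_all
  have hn1 : (!(PySem.Set.contains (vis ++ [n]) n)) = false := by simp
  have hn2 : (!(PySem.Set.contains vis n)) = true := by simp [hv]
  rw [hn1, hn2]
  simp only [Bool.false_eq_true, if_false, if_true]
  omega

theorem pvMu_pos (pool vis : List String) (n : String) (hp : n ∈ pool) (hv : n ∉ vis) :
    1 ≤ pvMu pool vis := by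
  unfold pvMu
  rw [Nat.one_le_iff_ne_zero, ← Nat.pos_iff_ne_zero, List.countP_pos_iff]
  exact ⟨n, (PySem.Set.mem_ofList pool n).mpr hp, by simp [hv]⟩

theorem getD_mk_nil_of_not_mem (d : List (String × List String)) (k : String)
    (h : k ∉ d.flatMap (fun p => p.1 :: p.2)) : (PySem.Dict.mk d).getD k [] = [] := by
  rw [PySem.Dict.getD_eq_get?_getD]
  cases hg : (PySem.Dict.mk d).get? k with
  | none => rfl
  | some v =>
    exfalso
    have hm := PySem.Dict.mem_items_of_get?_eq_some _ hg
    exact h (List.mem_flatMap.mpr ⟨(k, v), hm, by simp⟩)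

theorem length_getD_mk (d : List (String × List String)) (k : String) :
    ((PySem.Dict.mk d).getD k []).length ≤ (d.flatMap (fun p => p.2)).length := by
  rw [PySem.Dict.getD_eq_get?_getD]
  cases hg : (PySem.Dict.mk d).get? k with
  | none => simp
  | some v =>
    have hm := PySem.Dict.mem_items_of_get?_eq_some _ hg
    have hv : v ∈ d.map (fun p => p.2) := List.mem_map.mpr ⟨(k, v), hm, rfl⟩
    have : v.Sublist ((d.map (fun p => p.2)).flatten) := List.sublist_flatten_of_mem hv
    simpa [List.flatMap_def] using this.length_le

-- visited list only grows, by appending at the end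
theorem travR_prefix (fc cb : PySem.Dict String (List String)) :
    ∀ (f : Nat) (n : String) (vis : List String), vis <+: travR fc cb f n vis := by
  intro f
  induction f with
  | zero => intro n vis; simp [travR]
  | succ f ih =>
    have hfold : ∀ (ns : List String) (vis : List String),
        vis <+: ns.foldl (fun v n => travR fc cb f n v) vis := by
      intro ns
      induction ns with
      | nil => intro vis; simp
      | cons a tl ihl =>
        intro vis
        simp only [List.foldl_cons]
        exact (ih a vis).trans (ihl _)
    intro n vis
    by_cases h : n ∈ vis
    · simp [travR, h]
    · simp only [travR]
      rw [if_neg (by simpa using h)]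
      refine List.IsPrefix.trans ?_ ((hfold _ _).trans (hfold _ _))
      exact (PySem.Set.add_of_not_mem (by simpa using h)) ▸ List.prefix_append vis [n]

theorem travR_foldl_prefix (fc cb : PySem.Dict String (List String)) (f : Nat) :
    ∀ (ns : List String) (vis : List String), vis <+: ns.foldl (fun v n => travR fc cb f n v) vis := by
  intro ns
  induction ns with
  | nil => intro vis; simp
  | cons a tl ihl =>
    intro vis
    simp only [List.foldl_cons]
    exact (travR_prefix fc cb f a vis).trans (ihl _)

theorem drop_prefix_split (vis u w : List String) (h1 : vis <+: u) (h2 : u <+: w) :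
    w.drop vis.length = u.drop vis.length ++ w.drop u.length := by
  obtain ⟨s, rfl⟩ := h1
  obtain ⟨t, rfl⟩ := h2
  have h3 := List.drop_left (l₁ := vis ++ s) (l₂ := t)
  rw [List.append_assoc] at h3
  rw [List.append_assoc, List.drop_left, List.drop_left, h3]

-- A's paired traversal = (visit order, phase-2 filter of the newly visited suffix)
theorem trav_pair (pv fc cb : PySem.Dict String (List String)) :
    ∀ (f : Nat) (n : String) (vis hel : List String),
      travA pv fc cb f n (vis, hel)
        = (travR fc cb f n vis, addIf pv hel ((travR fc cb f n vis).drop vis.length)) := by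
  intro f
  induction f with
  | zero => intro n vis hel; simp [travA, travR, addIf]
  | succ f ih =>
    have hfold : ∀ (ns : List String) (vis hel : List String),
        ns.foldl (fun s n => travA pv fc cb f n s) (vis, hel)
          = (ns.foldl (fun v n => travR fc cb f n v) vis,
             addIf pv hel ((ns.foldl (fun v n => travR fc cb f n v) vis).drop vis.length)) := by
      intro ns
      induction ns with
      | nil => intro vis hel; simp [addIf]
      | cons a tl ihl =>
        intro vis hel
        simp only [List.foldl_cons]
        rw [ih a vis hel, ihl]
        congr 1
        rw [drop_prefix_split vis (travR fc cb f a vis)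
              (tl.foldl (fun v n => travR fc cb f n v) (travR fc cb f a vis))
              (travR_prefix fc cb f a vis) (travR_foldl_prefix fc cb f tl _),
            addIf_append]
    intro n vis hel
    by_cases hv : n ∈ vis
    · simp [travA, travR, hv, addIf]
    · have hvadd : PySem.Set.add vis n = vis ++ [n] := PySem.Set.add_of_not_mem hv
      have unfA : travA pv fc cb (f+1) n (vis, hel)
          = ((fc.getD n []) ++ (cb.getD n [])).foldl (fun s m => travA pv fc cb f m s)
              (PySem.Set.add vis n, if pv.contains n = true then PySem.Set.add hel n else hel) := by
        rw [List.foldl_append]; simp [travA, hv]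
      have unfR : travR fc cb (f+1) n vis
          = ((fc.getD n []) ++ (cb.getD n [])).foldl (fun v m => travR fc cb f m v)
              (PySem.Set.add vis n) := by
        rw [List.foldl_append]; simp [travR, hv]
      rw [unfA, unfR, hfold]
      congr 1
      have hpre : PySem.Set.add vis n <+:
          ((fc.getD n []) ++ (cb.getD n [])).foldl (fun v m => travR fc cb f m v) (PySem.Set.add vis n) :=
        travR_foldl_prefix fc cb f _ _
      obtain ⟨t, ht⟩ := hpre
      rw [← ht, hvadd] at *
      rw [show ((vis ++ [n]) ++ t).drop vis.length = n :: t by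
            rw [List.append_assoc, List.drop_left]; rfl,
          show ((vis ++ [n]) ++ t).drop (vis ++ [n]).length = t from List.drop_left]
      simp only [addIf, List.foldl_cons]

-- travR's result does not depend on the fuel, once the fuel exceeds the unvisited-pool count
theorem travR_stable (fcr cbr : List (String × List String)) :
    ∀ (k : Nat) (vis : List String) (n : String) (f g : Nat),
      pvMu (pvPool fcr cbr) vis ≤ k → k + 1 ≤ f → k + 1 ≤ g →
      travR (PySem.Dict.mk fcr) (PySem.Dict.mk cbr) f n vis
        = travR (PySem.Dict.mk fcr) (PySem.Dict.mk cbr) g n vis := by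
  intro k
  induction k with
  | zero =>
    intro vis n f g hmu hf hg
    obtain ⟨f', rfl⟩ : ∃ f', f = f' + 1 := ⟨f - 1, by omega⟩
    obtain ⟨g', rfl⟩ : ∃ g', g = g' + 1 := ⟨g - 1, by omega⟩
    by_cases hv : n ∈ vis
    · simp [travR, hv]
    · by_cases hp : n ∈ pvPool fcr cbr
      · exact absurd (pvMu_pos _ _ _ hp hv) (by omega)
      · have hfc : (PySem.Dict.mk fcr).getD n [] = [] :=
          getD_mk_nil_of_not_mem _ _ (fun hm => hp (by simp [pvPool]; left; simpa using hm))
        have hcb : (PySem.Dict.mk cbr).getD n [] = [] :=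
          getD_mk_nil_of_not_mem _ _ (fun hm => hp (by simp [pvPool]; right; simpa using hm))
        simp [travR, hv, hfc, hcb]
  | succ k ih =>
    intro vis n f g hmu hf hg
    obtain ⟨f', rfl⟩ : ∃ f', f = f' + 1 := ⟨f - 1, by omega⟩
    obtain ⟨g', rfl⟩ : ∃ g', g = g' + 1 := ⟨g - 1, by omega⟩
    by_cases hv : n ∈ vis
    · simp [travR, hv]
    · by_cases hp : n ∈ pvPool fcr cbr
      · have hlt := pvMu_add_lt (pvPool fcr cbr) vis n hp hv
        have hFS : ∀ (ns : List String) (vis' : List String),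
            pvMu (pvPool fcr cbr) vis' ≤ k →
            ns.foldl (fun v m => travR (PySem.Dict.mk fcr) (PySem.Dict.mk cbr) f' m v) vis'
              = ns.foldl (fun v m => travR (PySem.Dict.mk fcr) (PySem.Dict.mk cbr) g' m v) vis' := by
          intro ns
          induction ns with
          | nil => intro vis' _; rfl
          | cons a tl ihl =>
            intro vis' hst
            simp only [List.foldl_cons]
            rw [ih vis' a f' g' hst (by omega) (by omega)]
            exact ihl _ (le_trans
              (pvMu_mono _ vis' _ (travR_prefix (PySem.Dict.mk fcr) (PySem.Dict.mk cbr) g' a vis').subset)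
              hst)
        have unf : ∀ h : Nat,
            travR (PySem.Dict.mk fcr) (PySem.Dict.mk cbr) (h+1) n vis
              = (((PySem.Dict.mk fcr).getD n []) ++ ((PySem.Dict.mk cbr).getD n [])).foldl
                  (fun v m => travR (PySem.Dict.mk fcr) (PySem.Dict.mk cbr) h m v)
                  (PySem.Set.add vis n) := by
          intro h
          rw [List.foldl_append]
          simp [travR, hv]
        rw [unf f', unf g']
        exact hFS _ _ (by omega)
      · have hfc : (PySem.Dict.mk fcr).getD n [] = [] :=
          getD_mk_nil_of_not_mem _ _ (fun hm => hp (by simp [pvPool]; left; simpa using hm))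
        have hcb : (PySem.Dict.mk cbr).getD n [] = [] :=
          getD_mk_nil_of_not_mem _ _ (fun hm => hp (by simp [pvPool]; right; simpa using hm))
        simp [travR, hv, hfc, hcb]

theorem travR_foldl_stable (fcr cbr : List (String × List String)) :
    ∀ (ns : List String) (vis : List String) (f g : Nat),
      pvMu (pvPool fcr cbr) vis + 1 ≤ f → pvMu (pvPool fcr cbr) vis + 1 ≤ g →
      ns.foldl (fun v n => travR (PySem.Dict.mk fcr) (PySem.Dict.mk cbr) f n v) vis
        = ns.foldl (fun v n => travR (PySem.Dict.mk fcr) (PySem.Dict.mk cbr) g n v) vis := by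
  intro ns
  induction ns with
  | nil => intro vis f g _ _; rfl
  | cons a tl ihl =>
    intro vis f g hf hg
    simp only [List.foldl_cons]
    rw [travR_stable fcr cbr (pvMu (pvPool fcr cbr) vis) vis a f g le_rfl hf hg]
    have hm : pvMu (pvPool fcr cbr) (travR (PySem.Dict.mk fcr) (PySem.Dict.mk cbr) g a vis)
        ≤ pvMu (pvPool fcr cbr) vis :=
      pvMu_mono _ vis _ (travR_prefix (PySem.Dict.mk fcr) (PySem.Dict.mk cbr) g a vis).subset
    exact ihl _ f g (by omega) (by omega)

-- B's explicit-stack loop computes the fold of travR over the stack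
theorem dfs_sim (fcr cbr : List (String × List String)) :
    ∀ (f : Nat) (stack order : List String),
      stack.length + (pvMu (pvPool fcr cbr) order + 1) * (pvEdges fcr cbr + 1) ≤ f →
      dfsOrder (PySem.Dict.mk fcr) (PySem.Dict.mk cbr) f stack order
        = stack.foldl
            (fun o n => travR (PySem.Dict.mk fcr) (PySem.Dict.mk cbr) ((pvPool fcr cbr).length + 1) n o)
            order := by
  intro f
  induction f with
  | zero =>
    intro stack order h
    have := Nat.mul_pos (show 0 < pvMu (pvPool fcr cbr) order + 1 by omega) (show 0 < pvEdges fcr cbr + 1 by omega)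
    omega
  | succ f ih =>
    intro stack order h
    match stack with
    | [] => simp [dfsOrder]
    | node :: stack =>
      by_cases hv : node ∈ order
      · have hA : travR (PySem.Dict.mk fcr) (PySem.Dict.mk cbr)
            ((pvPool fcr cbr).length + 1) node order = order := by
          simp [travR, hv]
        rw [show dfsOrder (PySem.Dict.mk fcr) (PySem.Dict.mk cbr) (f+1) (node :: stack) order
            = dfsOrder (PySem.Dict.mk fcr) (PySem.Dict.mk cbr) f stack order
          from by simp [dfsOrder, hv]]
        rw [List.foldl_cons, hA]
        exact ih stack order (by simp at h ⊢; omega)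
      · have hvadd : order ++ [node] = PySem.Set.add order node := (PySem.Set.add_of_not_mem hv).symm
        have hstep : dfsOrder (PySem.Dict.mk fcr) (PySem.Dict.mk cbr) (f+1) (node :: stack) order
            = dfsOrder (PySem.Dict.mk fcr) (PySem.Dict.mk cbr) f
              ((((PySem.Dict.mk fcr).getD node []) ++ ((PySem.Dict.mk cbr).getD node [])) ++ stack)
              (PySem.Set.add order node) := by
          rw [← hvadd]; simp [dfsOrder, hv]
        have hmu_le := pvMu_le (pvPool fcr cbr) order
        have hlen : (node :: stack).length = stack.length + 1 := by simp
        by_cases hp : node ∈ pvPool fcr cbr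
        · have hlt := pvMu_add_lt (pvPool fcr cbr) order node hp hv
          have hl1 := length_getD_mk fcr node
          have hl2 := length_getD_mk cbr node
          have hns : (((PySem.Dict.mk fcr).getD node []) ++ ((PySem.Dict.mk cbr).getD node [])).length
              ≤ pvEdges fcr cbr := by
            simp only [List.length_append, pvEdges]; omega
          have hmul : (pvMu (pvPool fcr cbr) (PySem.Set.add order node) + 1) * (pvEdges fcr cbr + 1)
              ≤ pvMu (pvPool fcr cbr) order * (pvEdges fcr cbr + 1) :=
            Nat.mul_le_mul_right _ (by omega)
          have hexp : (pvMu (pvPool fcr cbr) order + 1) * (pvEdges fcr cbr + 1)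
              = pvMu (pvPool fcr cbr) order * (pvEdges fcr cbr + 1) + pvEdges fcr cbr + 1 := by ring
          have hih := ih ((((PySem.Dict.mk fcr).getD node []) ++ ((PySem.Dict.mk cbr).getD node [])) ++ stack)
            (PySem.Set.add order node)
            (by simp only [List.length_append] at *; omega)
          have unfR : travR (PySem.Dict.mk fcr) (PySem.Dict.mk cbr)
              ((pvPool fcr cbr).length + 1) node order
              = (((PySem.Dict.mk fcr).getD node []) ++ ((PySem.Dict.mk cbr).getD node [])).foldl
                  (fun v m => travR (PySem.Dict.mk fcr) (PySem.Dict.mk cbr)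
                    ((pvPool fcr cbr).length) m v)
                  (PySem.Set.add order node) := by
            rw [List.foldl_append]
            simp [travR, hv]
          have hstab : (((PySem.Dict.mk fcr).getD node []) ++ ((PySem.Dict.mk cbr).getD node [])).foldl
                  (fun v m => travR (PySem.Dict.mk fcr) (PySem.Dict.mk cbr)
                    ((pvPool fcr cbr).length) m v)
                  (PySem.Set.add order node)
              = (((PySem.Dict.mk fcr).getD node []) ++ ((PySem.Dict.mk cbr).getD node [])).foldl
                  (fun v m => travR (PySem.Dict.mk fcr) (PySem.Dict.mk cbr)
                    ((pvPool fcr cbr).length + 1) m v)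
                  (PySem.Set.add order node) := by
            apply travR_foldl_stable <;>
              · show pvMu (pvPool fcr cbr) (PySem.Set.add order node) + 1 ≤ _
                omega
          rw [hstep, hih, List.foldl_cons, unfR, hstab, List.foldl_append]
        · have hfc : (PySem.Dict.mk fcr).getD node [] = [] :=
            getD_mk_nil_of_not_mem _ _ (fun hm => hp (by simp [pvPool]; left; simpa using hm))
          have hcb : (PySem.Dict.mk cbr).getD node [] = [] :=
            getD_mk_nil_of_not_mem _ _ (fun hm => hp (by simp [pvPool]; right; simpa using hm))
          have hmono := pvMu_mono (pvPool fcr cbr) order (PySem.Set.add order node)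
            (fun x hx => (PySem.Set.mem_add order node x).mpr (Or.inl hx))
          have hmul : (pvMu (pvPool fcr cbr) (PySem.Set.add order node) + 1) * (pvEdges fcr cbr + 1)
              ≤ (pvMu (pvPool fcr cbr) order + 1) * (pvEdges fcr cbr + 1) :=
            Nat.mul_le_mul_right _ (by omega)
          have hih := ih stack (PySem.Set.add order node) (by simp only [hlen] at h; omega)
          have hA : travR (PySem.Dict.mk fcr) (PySem.Dict.mk cbr)
              ((pvPool fcr cbr).length + 1) node order = PySem.Set.add order node := by
            simp [travR, hv, hfc, hcb]
          rw [hstep, hfc, hcb, List.nil_append, List.nil_append, hih, List.foldl_cons, hA]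

-- A's decorated-set fold = set of the filtered key list (B's comprehension)
theorem decorated_eq (c : String → Bool) (l : List (String × List String)) :
    l.foldl (fun s p => if c p.1 then PySem.Set.add s p.1 else s) PySem.Set.empty
      = PySem.Set.ofList ((l.map Prod.fst).filter c) := by
  rw [PySem.Set.ofList_eq_foldl]
  show l.foldl (fun s p => if c p.1 then PySem.Set.add s p.1 else s) []
      = ((l.map Prod.fst).filter c).foldl PySem.Set.add []
  generalize [] = s
  induction l generalizing s with
  | nil => rfl
  | cons a tl ihl =>
    simp only [List.foldl_cons, List.map_cons, List.filter_cons]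
    by_cases hc : c a.1
    · simp only [hc, if_true, List.foldl_cons]; exact ihl _
    · simp only [hc, if_false, Bool.false_eq_true]; exact ihl _

-- ===== VERDICT (by name: the statement is the Claim_ definition above) =====
theorem find_helper_functions_eq (pvr fcr cbr : List (String × List String)) :
    find_helper_functions pvr fcr cbr = find_helper_functions_alt pvr fcr cbr := by
  have hpoint : ∀ (hel : List String) (s : String),
      (travA (PySem.Dict.mk pvr) (PySem.Dict.mk fcr) (PySem.Dict.mk cbr)
        ((pvPool fcr cbr).length + 1) s (PySem.Set.empty, hel)).2
      = (dfsOrder (PySem.Dict.mk fcr) (PySem.Dict.mk cbr)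
          (1 + ((pvPool fcr cbr).length + 1) * (pvEdges fcr cbr + 1)) [s] []).foldl
          (fun h node => if (PySem.Dict.mk pvr).contains node then PySem.Set.add h node else h) hel := by
    intro hel s
    have hmu := pvMu_le (pvPool fcr cbr) []
    have hmul : (pvMu (pvPool fcr cbr) [] + 1) * (pvEdges fcr cbr + 1)
        ≤ ((pvPool fcr cbr).length + 1) * (pvEdges fcr cbr + 1) :=
      Nat.mul_le_mul_right _ (by omega)
    rw [dfs_sim fcr cbr (1 + ((pvPool fcr cbr).length + 1) * (pvEdges fcr cbr + 1)) [s] []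
      (by simp only [List.length_cons, List.length_nil]; omega)]
    simp only [List.foldl_cons, List.foldl_nil]
    rw [trav_pair (PySem.Dict.mk pvr) (PySem.Dict.mk fcr) (PySem.Dict.mk cbr)
        ((pvPool fcr cbr).length + 1) s PySem.Set.empty hel]
    show addIf (PySem.Dict.mk pvr) hel _ = addIf (PySem.Dict.mk pvr) hel _
    rfl
  simp only [find_helper_functions, find_helper_functions_alt]
  rw [decorated_eq (fun name => ((PySem.Dict.mk cbr).getD name []).any (fun c => PySem.Str.startswith c "_")) pvr]
  congr 1
  funext hel s
  exact hpoint hel s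

theorem find_helper_functions_spec : Claim_equal_find_helper_functions := by
  intro pvr fcr cbr _
  unfold Spec_find_helper_functions
  exact find_helper_functions_eq pvr fcr cbr
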